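-- pv_equiv track=rewrite | github.com/Tasker-AI/python-rpg | lessons/002-core_syntax_data_types/string_manipulation_exam.py | find_longest_balanced_name
-- ===== SOURCE A (Python) =====
-- def find_longest_balanced_name(character_names):
--     longest_balanced = ""
--     for word in character_names:
--         # Initialize counters for each name
--         vowel_count = 0
--         const_count = 0
--
--         lowercase_word = word.lower()
--         for char in lowercase_word:
--             if char.isalpha():
--                 if char in "aeiou":
--                     vowel_count += 1
--                 else:
--                     const_count += 1
--         if vowel_count == const_count:
--             if len(word) > len(longest_balanced):
--                 longest_balanced = word
--     return longest_balanced
-- ===== SOURCE B (Python) =====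
-- def find_longest_balanced_name(character_names):
--     def balance(word):
--         # signed score: +1 per vowel, -1 per consonant; 0 iff balanced
--         score = 0
--         for ch in word.lower():
--             if ch.isalpha():
--                 score += 1 if ch in "aeiou" else -1
--         return score
--
--     # stable length-descending sort, then the first balanced name is the answer
--     for name in sorted(character_names, key=len, reverse=True):
--         if balance(name) == 0:
--             return name
--     return ""
-- ===== Notes on version B (the rewrite author's own statement) =====
-- stated objective: alternative
-- what changed: Sort-then-scan instead of a running-best pass: B stable-sorts the names by length descending and returns the first one whose signed vowel/consonant score (+1/-1 per letter) is zero, instead of A's single pass maintaining a longest-so-far with a vowel/consonant counter pair.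
import Mathlib
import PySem

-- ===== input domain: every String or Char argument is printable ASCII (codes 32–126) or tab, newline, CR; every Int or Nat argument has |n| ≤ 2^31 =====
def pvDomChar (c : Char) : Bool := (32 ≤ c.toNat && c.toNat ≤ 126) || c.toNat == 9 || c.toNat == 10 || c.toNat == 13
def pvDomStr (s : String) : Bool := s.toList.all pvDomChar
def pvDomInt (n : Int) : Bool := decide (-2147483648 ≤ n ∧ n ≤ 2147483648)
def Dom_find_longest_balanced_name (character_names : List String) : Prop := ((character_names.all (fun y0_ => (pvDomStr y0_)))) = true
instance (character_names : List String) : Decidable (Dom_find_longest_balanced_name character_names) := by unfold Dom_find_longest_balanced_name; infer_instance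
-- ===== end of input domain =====

-- B replaces A's running-best single pass by sort-then-scan: stable-sort the names by
-- length descending and return the first whose signed vowel/consonant score is zero.

-- char in "aeiou"  (shared by both ports; exact membership test)
def pvIsVowel (c : Char) : Bool := (['a', 'e', 'i', 'o', 'u'] : List Char).contains c

-- ===== PORT A =====
-- inner loop of A: counts (vowel_count, const_count) over the lowered word's characters
def pvCountA (cs : List Char) (acc : Nat × Nat) : Nat × Nat :=
  cs.foldl (fun p c =>
    if PySem.Chars.isalpha c then
      if pvIsVowel c then (p.1 + 1, p.2) else (p.1, p.2 + 1)
    else p) acc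

def find_longest_balanced_name (character_names : List String) : String :=
  character_names.foldl (fun longest_balanced word =>
    let counts := pvCountA (PySem.Str.lower word).toList (0, 0)
    if counts.1 == counts.2 then
      if PySem.Str.len longest_balanced < PySem.Str.len word then word
      else longest_balanced
    else longest_balanced) ""

-- ===== PORT B =====
-- B's inner loop: signed score, +1 per vowel, -1 per other letter
def pvBalance (word : String) : Int :=
  (PySem.Str.lower word).toList.foldl
    (fun score c =>
      if PySem.Chars.isalpha c then
        if pvIsVowel c then score + 1 else score - 1
      else score) 0

-- 'for name in sorted(names, key=len, reverse=True): if balance(name)==0: return name' / 'return ""'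
def find_longest_balanced_name_alt (character_names : List String) : String :=
  ((PySem.List.sorted character_names (fun w => PySem.Str.len w) true).find?
    (fun name => pvBalance name == 0)).getD ""

-- ===== PRECONDITION & SPEC =====
def Spec_find_longest_balanced_name (character_names : List String) (out : String) : Prop := out = find_longest_balanced_name_alt character_names
instance (character_names : List String) (out : String) : Decidable (Spec_find_longest_balanced_name character_names out) := by unfold Spec_find_longest_balanced_name; infer_instance

-- ===== CLAIM (what is proved, stated in full; the proofs are below) =====
def Claim_equal_find_longest_balanced_name : Prop := ∀ (character_names : List String), Dom_find_longest_balanced_name character_names → Spec_find_longest_balanced_name character_names (find_longest_balanced_name character_names)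

-- ===== LEMMAS AND PROOFS =====

-- A's loop body, named for the proofs (definitionally the port's lambda)
def pvStepA (longest_balanced word : String) : String :=
  let counts := pvCountA (PySem.Str.lower word).toList (0, 0)
  if counts.1 == counts.2 then
    if PySem.Str.len longest_balanced < PySem.Str.len word then word
    else longest_balanced
  else longest_balanced

-- the insertion predicate of PySem's reverse sort with key = len
def pvBef (a b : String) : Bool := decide (PySem.Str.len b < PySem.Str.len a)

-- B's scan predicate
def pvP (w : String) : Bool := pvBalance w == 0

lemma portA_eq (names : List String) :
    find_longest_balanced_name names = names.foldl pvStepA "" := rfl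

lemma portB_eq (names : List String) :
    find_longest_balanced_name_alt names =
      ((names.foldl (fun acc x => PySem.List.insertBy pvBef x acc) []).find? pvP).getD "" := by
  unfold find_longest_balanced_name_alt
  rw [PySem.List.sorted_rev_eq_foldl_insertBy]
  rfl

lemma vowel_isalpha (c : Char) (h : pvIsVowel c = true) : PySem.Chars.isalpha c = true := by
  simp [pvIsVowel] at h
  rcases h with h | h | h | h | h <;> subst h <;> decide

lemma pvCountA_spec (cs : List Char) (v0 c0 : Nat) :
    pvCountA cs (v0, c0) =
      (v0 + cs.countP (fun c => pvIsVowel c),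
       c0 + cs.countP (fun c => PySem.Chars.isalpha c && !pvIsVowel c)) := by
  induction cs generalizing v0 c0 with
  | nil => simp [pvCountA]
  | cons c t ih =>
    by_cases ha : PySem.Chars.isalpha c = true
    · by_cases hv : pvIsVowel c = true
      · simp only [pvCountA, List.foldl_cons, ha, hv, if_true] at ih ⊢
        rw [ih (v0 + 1) c0]
        simp [ha, hv]
        omega
      · simp only [pvCountA, List.foldl_cons, ha, hv, if_true, if_false,
          Bool.false_eq_true] at ih ⊢
        rw [ih v0 (c0 + 1)]
        simp [ha, hv]
        omega
    · have hv : pvIsVowel c = false := by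
        by_contra h
        exact ha (vowel_isalpha c (by simpa using h))
      simp only [pvCountA, List.foldl_cons, eq_false_of_ne_true ha, Bool.false_eq_true,
        if_false] at ih ⊢
      rw [ih v0 c0]
      simp [ha, hv]

lemma pvBalance_spec (cs : List Char) (s0 : Int) :
    cs.foldl (fun score c =>
      if PySem.Chars.isalpha c then
        if pvIsVowel c then score + 1 else score - 1
      else score) s0 =
      s0 + (cs.countP (fun c => pvIsVowel c) : Int)
         - (cs.countP (fun c => PySem.Chars.isalpha c && !pvIsVowel c) : Int) := by
  induction cs generalizing s0 with
  | nil => simp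
  | cons c t ih =>
    by_cases ha : PySem.Chars.isalpha c = true
    · by_cases hv : pvIsVowel c = true
      · simp only [List.foldl_cons, ha, hv, if_true]
        rw [ih (s0 + 1)]
        simp [ha, hv]
        ring
      · simp only [List.foldl_cons, ha, hv, if_true, Bool.false_eq_true, if_false]
        rw [ih (s0 - 1)]
        simp [ha, hv]
        ring
    · have hv : pvIsVowel c = false := by
        by_contra h
        exact ha (vowel_isalpha c (by simpa using h))
      simp only [List.foldl_cons, eq_false_of_ne_true ha, Bool.false_eq_true, if_false]
      rw [ih s0]
      simp [ha, hv]

-- A's balance test equals B's: v == c  iff  v - c == 0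
lemma balanced_eq (word : String) :
    ((pvCountA (PySem.Str.lower word).toList (0, 0)).1 ==
     (pvCountA (PySem.Str.lower word).toList (0, 0)).2) = pvP word := by
  simp only [pvP, pvBalance, pvCountA_spec, pvBalance_spec]
  generalize (PySem.Str.lower word).toList = cs
  rw [Bool.eq_iff_iff]
  simp only [beq_iff_eq]
  omega

lemma insertBy_nil (x : String) : PySem.List.insertBy pvBef x [] = [x] := rfl

lemma insertBy_cons (x y : String) (ys : List String) :
    PySem.List.insertBy pvBef x (y :: ys) =
      if pvBef x y then x :: y :: ys else y :: PySem.List.insertBy pvBef x ys := rfl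

lemma len_nonneg (x : String) : 0 ≤ PySem.Str.len x := by
  simp only [PySem.Str.len]
  positivity

lemma len_nonpos_eq_empty (x : String) (h : PySem.Str.len x ≤ 0) : x = "" := by
  rw [← String.toList_eq_nil_iff, ← List.length_eq_zero_iff]
  simp only [PySem.Str.len] at h
  omega

lemma len_empty : PySem.Str.len "" = 0 := rfl

-- inserting a non-matching element does not change find?
lemma find?_insertBy_neg (x : String) (hx : pvP x = false) (s : List String) :
    (PySem.List.insertBy pvBef x s).find? pvP = s.find? pvP := by
  induction s with
  | nil => simp [insertBy_nil, List.find?, hx]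
  | cons y t ih =>
    rw [insertBy_cons]
    by_cases hb : pvBef x y = true
    · simp [hb, List.find?, hx]
    · simp only [hb, Bool.false_eq_true, if_false]
      by_cases hy : pvP y = true
      · simp [List.find?, hy]
      · simp only [List.find?, eq_false_of_ne_true hy, ih]

-- inserting a matching element into a length-descending list = A's challenge step
lemma pvStepA_eq (acc x : String) :
    pvStepA acc x =
      if pvP x then (if PySem.Str.len acc < PySem.Str.len x then x else acc) else acc := by
  show (if ((pvCountA (PySem.Str.lower x).toList (0, 0)).1 ==
            (pvCountA (PySem.Str.lower x).toList (0, 0)).2) then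
          (if PySem.Str.len acc < PySem.Str.len x then x else acc)
        else acc) = _
  rw [balanced_eq]

lemma find?_insertBy_pos (x : String) (hx : pvP x = true) (s : List String)
    (hs : s.Pairwise (fun a b => PySem.Str.len b ≤ PySem.Str.len a)) :
    ((PySem.List.insertBy pvBef x s).find? pvP).getD "" =
      (if PySem.Str.len ((s.find? pvP).getD "") < PySem.Str.len x then x
       else (s.find? pvP).getD "") := by
  induction s with
  | nil =>
    rw [insertBy_nil, List.find?_singleton]
    simp only [hx, if_pos, Option.getD_some, List.find?_nil, Option.getD_none, len_empty]
    by_cases h : (0 : Int) < PySem.Str.len x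
    · rw [if_pos h]
    · rw [if_neg h, len_nonpos_eq_empty x (by omega)]
  | cons y t ih =>
    rw [List.pairwise_cons] at hs
    obtain ⟨hy_ge, ht⟩ := hs
    rw [insertBy_cons]
    by_cases hb : pvBef x y = true
    · -- len y < len x : x goes first and wins
      have hyx : PySem.Str.len y < PySem.Str.len x := by
        simpa [pvBef] using hb
      have hacc : PySem.Str.len (((y :: t).find? pvP).getD "") < PySem.Str.len x := by
        cases hf : (y :: t).find? pvP with
        | none =>
          rw [Option.getD_none, len_empty]
          have := len_nonneg y
          omega
        | some m =>
          have hm := List.mem_of_find?_eq_some hf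
          rw [Option.getD_some]
          rcases List.mem_cons.mp hm with rfl | hmt
          · exact hyx
          · have := hy_ge m hmt
            omega
      rw [if_pos hb, List.find?_cons_of_pos hx, Option.getD_some, if_pos hacc]
    · -- len x ≤ len y : y stays first
      rw [if_neg hb]
      have hxy : PySem.Str.len x ≤ PySem.Str.len y := by
        simp only [pvBef, decide_eq_true_eq] at hb
        omega
      by_cases hy : pvP y = true
      · rw [List.find?_cons_of_pos hy, List.find?_cons_of_pos hy, Option.getD_some,
          if_neg (by omega)]
      · rw [List.find?_cons_of_neg (by simpa using hy), List.find?_cons_of_neg (by simpa using hy)]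
        exact ih ht

-- the sorted accumulator built so far is length-descending
lemma foldl_insertBy_eq_sorted (names : List String) :
    names.foldl (fun acc x => PySem.List.insertBy pvBef x acc) [] =
      PySem.List.sorted names (fun w => PySem.Str.len w) true := by
  rw [PySem.List.sorted_rev_eq_foldl_insertBy]
  rfl

lemma core (names : List String) :
    ((names.foldl (fun acc x => PySem.List.insertBy pvBef x acc) []).find? pvP).getD "" =
      names.foldl pvStepA "" := by
  induction names using List.reverseRecOn with
  | nil => rfl
  | append_singleton xs x ih =>
    rw [List.foldl_append, List.foldl_append]
    simp only [List.foldl_cons, List.foldl_nil]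
    have hsorted : (xs.foldl (fun acc x => PySem.List.insertBy pvBef x acc) []).Pairwise
        (fun a b => PySem.Str.len b ≤ PySem.Str.len a) := by
      rw [foldl_insertBy_eq_sorted]
      exact PySem.List.sorted_pairwise_rev xs (fun w => PySem.Str.len w)
    by_cases hx : pvP x = true
    · rw [find?_insertBy_pos x hx _ hsorted, ih]
      show _ = pvStepA (xs.foldl pvStepA "") x
      rw [pvStepA_eq, if_pos hx]
    · rw [find?_insertBy_neg x (eq_false_of_ne_true hx), ih]
      show _ = pvStepA (xs.foldl pvStepA "") x
      rw [pvStepA_eq, if_neg (by simpa using hx)]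

-- ===== VERDICT (by name: the statement is the Claim_ definition above) =====
theorem find_longest_balanced_name_spec : Claim_equal_find_longest_balanced_name := by
  intro names _
  show find_longest_balanced_name names = find_longest_balanced_name_alt names
  rw [portA_eq, portB_eq, core]
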